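-- pv_equiv track=rewrite | github.com/karialo/AlbumForge | AlbumForge.py | next_free_numbers
-- ===== SOURCE A (Python) =====
-- def next_free_numbers(existing:list[str], count:int)->list[str]:
--     used = set(int(n) for n in existing if n.isdigit())
--     nums, n = [], 1
--     while len(nums) < count:
--         if n not in used:
--             nums.append(f"{n:02d}")
--         n += 1
--     return nums
-- ===== SOURCE B (Python) =====
-- def next_free_numbers(existing: list[str], count: int) -> list[str]:
--     used = sorted(set(int(n) for n in existing if n.isdigit()))
--     nums, n = [], 1
--     for u in used:
--         if u < n:
--             continue
--         while n < u and len(nums) < count: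
--             nums.append(f"{n:02d}")
--             n += 1
--         n = u + 1
--     while len(nums) < count:
--         nums.append(f"{n:02d}")
--         n += 1
--     return nums
-- ===== Notes on version B (the rewrite author's own statement) =====
-- stated objective: alternative
-- what changed: B sorts the distinct used numbers once and fills the gaps in a single merge-style pass (plus a tail loop past the largest used value), instead of testing set membership for every candidate integer.
import Mathlib
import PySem

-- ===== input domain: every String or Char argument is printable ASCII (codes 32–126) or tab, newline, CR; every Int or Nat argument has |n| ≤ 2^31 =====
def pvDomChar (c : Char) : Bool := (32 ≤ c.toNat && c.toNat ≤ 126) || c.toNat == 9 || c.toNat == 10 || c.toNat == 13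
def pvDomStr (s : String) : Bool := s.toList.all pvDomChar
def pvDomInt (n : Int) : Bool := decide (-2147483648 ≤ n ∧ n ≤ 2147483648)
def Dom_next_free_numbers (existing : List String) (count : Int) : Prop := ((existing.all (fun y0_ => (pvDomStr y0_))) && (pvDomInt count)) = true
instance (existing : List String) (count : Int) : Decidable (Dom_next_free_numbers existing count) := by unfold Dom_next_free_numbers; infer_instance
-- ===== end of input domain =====

-- B replaces the per-candidate set-membership loop with one merge-style pass over the sorted used numbers (alternative decomposition, same result).


-- ===== PORT A =====
-- f"{n:02d}" = str(n).zfill(2) (zero-pad to width 2, sign in front); exact for every int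
def pvFmt02 (n : Int) : String := PySem.Str.zfill (PySem.Int.toStr n) 2

-- used = set(int(n) for n in existing if n.isdigit()); `.getD 0` is never taken: ofStr? succeeds on every digit-only nonempty string
def pvUsed (existing : List String) : PySem.Set Int :=
  PySem.Set.ofList ((existing.filter (fun s => PySem.Str.strIsdigit s)).map
    (fun s => (PySem.Int.ofStr? s).getD 0))

-- termination helper for A's while-loop (cited in decreasing_by)
theorem pvFilter_ge_len_le (used : List Int) (n : Int) :
    (used.filter (fun u => decide (n < u))).length ≤
      (used.filter (fun u => decide (n ≤ u))).length := by
  induction used with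
  | nil => simp
  | cons a t ih =>
      by_cases h1 : n < a <;> by_cases h2 : n ≤ a <;>
        simp [List.filter, h1, h2] <;> omega

theorem pvFilter_ge_len_lt (used : List Int) (n : Int) (h : n ∈ used) :
    (used.filter (fun u => decide (n < u))).length <
      (used.filter (fun u => decide (n ≤ u))).length := by
  induction used with
  | nil => simp at h
  | cons a t ih =>
      rcases List.mem_cons.mp h with rfl | hm
      · have h1 : ¬ (n < n) := lt_irrefl n
        have h2 : n ≤ n := le_refl n
        have := pvFilter_ge_len_le t n
        simp [List.filter]; omega
      · have := ih hm
        by_cases h1 : n < a <;> by_cases h2 : n ≤ a <;>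
          simp [List.filter, h1, h2] <;> omega

-- A's while-loop: while len(nums) < count: if n not in used: nums.append(f"{n:02d}"); n += 1
def pvALoop (used : List Int) (count : Int) (nums : List String) (n : Int) : List String :=
  if (nums.length : Int) < count then
    if n ∈ used then pvALoop used count nums (n + 1)
    else pvALoop used count (nums ++ [pvFmt02 n]) (n + 1)
  else nums
termination_by (count - (nums.length : Int)).toNat + (used.filter (fun u => decide (n ≤ u))).length
decreasing_by
  · have hE : List.filter (fun u => decide (n + 1 ≤ u)) used
        = List.filter (fun u => decide (n < u)) used :=
      List.filter_congr (fun x _ => by simp only [decide_eq_decide]; omega)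
    rw [hE]
    have := pvFilter_ge_len_lt used n (by assumption)
    omega
  · have hE : List.filter (fun u => decide (n + 1 ≤ u)) used
        = List.filter (fun u => decide (n < u)) used :=
      List.filter_congr (fun x _ => by simp only [decide_eq_decide]; omega)
    rw [hE]
    have := pvFilter_ge_len_le used n
    simp only [List.length_append, List.length_cons, List.length_nil]
    omega

def next_free_numbers (existing : List String) (count : Int) : List String :=
  pvALoop (pvUsed existing) count [] 1

-- ===== PORT B =====
-- inner while: while n < u and len(nums) < count: nums.append(f"{n:02d}"); n += 1
def pvFill (count : Int) (nums : List String) (n target : Int) : List String × Int :=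
  if n < target ∧ (nums.length : Int) < count then
    pvFill count (nums ++ [pvFmt02 n]) (n + 1) target
  else (nums, n)
termination_by (target - n).toNat
decreasing_by omega

-- the for-loop over the sorted used values, threading (nums, n)
def pvBFor (used : List Int) (count : Int) (nums : List String) (n : Int) : List String × Int :=
  match used with
  | [] => (nums, n)
  | u :: us =>
      if u < n then pvBFor us count nums n
      else pvBFor us count (pvFill count nums n u).1 (u + 1)

-- trailing while: while len(nums) < count: nums.append(f"{n:02d}"); n += 1
def pvTail (count : Int) (nums : List String) (n : Int) : List String :=
  if (nums.length : Int) < count then pvTail count (nums ++ [pvFmt02 n]) (n + 1)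
  else nums
termination_by (count - (nums.length : Int)).toNat
decreasing_by simp only [List.length_append, List.length_cons, List.length_nil]; omega

def next_free_numbers_alt (existing : List String) (count : Int) : List String :=
  let used := PySem.List.sorted (pvUsed existing) (fun x => x) false
  let p := pvBFor used count [] 1
  pvTail count p.1 p.2

-- ===== PRECONDITION & SPEC =====
def Spec_next_free_numbers (existing : List String) (count : Int) (out : List String) : Prop := out = next_free_numbers_alt existing count
instance (existing : List String) (count : Int) (out : List String) : Decidable (Spec_next_free_numbers existing count out) := by unfold Spec_next_free_numbers; infer_instance

-- ===== CLAIM (what is proved, stated in full; the proofs are below) =====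
def Claim_equal_next_free_numbers : Prop := ∀ (existing : List String) (count : Int), Dom_next_free_numbers existing count → Spec_next_free_numbers existing count (next_free_numbers existing count)

-- ===== LEMMAS AND PROOFS =====

-- once every used value lies below n, A's loop is a plain counting loop = B's trailing while
theorem pvALoop_eq_tail (used : List Int) (count : Int) (nums : List String) (n : Int)
    (h : ∀ u ∈ used, u < n) : pvALoop used count nums n = pvTail count nums n := by
  unfold pvALoop pvTail
  by_cases hlt : (nums.length : Int) < count
  · have hnm : n ∉ used := fun hm => absurd (h n hm) (lt_irrefl n)
    simp only [hlt, if_true, hnm, if_false]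
    exact pvALoop_eq_tail used count (nums ++ [pvFmt02 n]) (n + 1)
      (fun u hu => by have := h u hu; omega)
  · simp [hlt]
termination_by (count - (nums.length : Int)).toNat
decreasing_by simp only [List.length_append, List.length_cons, List.length_nil]; omega

-- advancing A's loop across the gap up to the least used value ≥ n equals one pvFill step
theorem pvALoop_fill (used : List Int) (count : Int) (nums : List String) (n u : Int)
    (hnu : n ≤ u) (hu : u ∈ used) (hmin : ∀ v ∈ used, n ≤ v → u ≤ v) :
    pvALoop used count nums n = pvALoop used count (pvFill count nums n u).1 (u + 1) := by
  rw [pvFill]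
  by_cases hc : n < u ∧ (nums.length : Int) < count
  · have hnm : n ∉ used := fun hm => by have := hmin n hm (le_refl n); omega
    rw [pvALoop]
    simp only [hc.2, if_true, hnm, if_false, hc, if_true]
    exact pvALoop_fill used count (nums ++ [pvFmt02 n]) (n + 1) u (by omega) hu
      (fun v hv hnv => hmin v hv (by omega))
  · simp only [hc, if_false]
    by_cases hlt : (nums.length : Int) < count
    · have hne : n = u := by
        rcases not_and_or.mp hc with h1 | h2
        · omega
        · exact absurd hlt h2
      subst hne
      rw [pvALoop]
      simp [hlt, hu]
    · have hR : pvALoop used count nums (u + 1) = nums := by rw [pvALoop]; simp [hlt]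
      rw [pvALoop]; simp [hlt, hR]
termination_by (u - n).toNat
decreasing_by omega

-- main invariant: a sorted tail S that contains every used value ≥ n simulates A's loop
theorem pvALoop_eq_bfor (used : List Int) (count : Int) (S : List Int)
    (hsub : ∀ v ∈ S, v ∈ used) (nums : List String) (n : Int)
    (hS : S.Pairwise (· ≤ ·)) (hcover : ∀ v ∈ used, n ≤ v → v ∈ S) :
    pvALoop used count nums n = pvTail count (pvBFor S count nums n).1 (pvBFor S count nums n).2 := by
  induction S generalizing nums n with
  | nil =>
      rw [pvBFor]
      exact pvALoop_eq_tail used count nums n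
        (fun u hu => by by_contra hnn; exact absurd (hcover u hu (by omega)) (List.not_mem_nil))
  | cons u us ih =>
      have hpw := List.pairwise_cons.mp hS
      by_cases hun : u < n
      · rw [pvBFor]
        simp only [hun, if_true]
        exact ih (fun v hv => hsub v (List.mem_cons_of_mem _ hv)) nums n hpw.2
          (fun v hv hnv => by
            rcases List.mem_cons.mp (hcover v hv hnv) with rfl | h
            · omega
            · exact h)
      · have hnu : n ≤ u := by omega
        have hu : u ∈ used := hsub u List.mem_cons_self
        have hmin : ∀ v ∈ used, n ≤ v → u ≤ v := fun v hv hnv => by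
          rcases List.mem_cons.mp (hcover v hv hnv) with rfl | h
          · exact le_rfl
          · exact hpw.1 v h
        rw [pvALoop_fill used count nums n u hnu hu hmin, pvBFor]
        simp only [hun, if_false]
        exact ih (fun v hv => hsub v (List.mem_cons_of_mem _ hv)) _ _ hpw.2
          (fun v hv hnv => by
            rcases List.mem_cons.mp (hcover v hv (by omega)) with rfl | h
            · omega
            · exact h)

-- ===== VERDICT (by name: the statement is the Claim_ definition above) =====
theorem next_free_numbers_spec : Claim_equal_next_free_numbers := by
  intro existing count _
  unfold Spec_next_free_numbers next_free_numbers next_free_numbers_alt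
  exact pvALoop_eq_bfor (pvUsed existing) count
    (PySem.List.sorted (pvUsed existing) (fun x => x) false)
    (fun v hv => (PySem.List.mem_sorted _ _ _ _).mp hv) [] 1
    (by simpa using PySem.List.sorted_pairwise (pvUsed existing) (fun x => x))
    (fun v hv _ => (PySem.List.mem_sorted _ _ _ _).mpr hv)
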